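-- pv_equiv track=rewrite | github.com/foundations/RevvyFramework | ble_revvy.py | extract_button_states
-- ===== SOURCE A (Python) =====
-- from functools import reduce
--
-- def extract_button_states(data):
--     def nth_bit(byte, bit):
--         return (byte & (1 << bit)) != 0
--
--     def expand_byte(byte):
--         return [nth_bit(byte, x) for x in range(8)]
--
--     return reduce(
--         lambda x, y: x + y,
--         map(expand_byte, data),
--         []
--     )
-- ===== SOURCE B (Python) =====
-- # Precomputed 256-entry table: bit patterns (LSB first) for every byte value,
-- # built once via binary string formatting; per input byte it is one lookup+extend.
-- _BYTE_BITS = [[c == '1' for c in format(i, '08b')[::-1]] for i in range(256)]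
--
-- def extract_button_states(data):
--     states = []
--     for byte in data:
--         states.extend(_BYTE_BITS[byte & 0xFF])
--     return states
-- ===== Notes on version B (the rewrite author's own statement) =====
-- stated objective: faster
-- what changed: Replaces the per-byte mask-test loop folded via reduce-of-list-concatenations with a 256-entry lookup table (built once from each value's reversed 8-bit binary string) so each input byte becomes a single table lookup plus extend, removing both the inner bit loop and the quadratic repeated copying of reduce(x+y).
import Mathlib
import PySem

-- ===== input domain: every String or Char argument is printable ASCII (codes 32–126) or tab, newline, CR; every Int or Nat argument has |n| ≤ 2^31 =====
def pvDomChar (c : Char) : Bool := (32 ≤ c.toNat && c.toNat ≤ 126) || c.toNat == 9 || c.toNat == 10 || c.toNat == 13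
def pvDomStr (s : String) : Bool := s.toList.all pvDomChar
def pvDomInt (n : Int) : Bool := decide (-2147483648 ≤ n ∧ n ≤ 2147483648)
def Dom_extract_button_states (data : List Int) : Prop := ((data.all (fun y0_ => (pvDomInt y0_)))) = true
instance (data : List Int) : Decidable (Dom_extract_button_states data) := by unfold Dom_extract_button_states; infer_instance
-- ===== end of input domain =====

set_option maxRecDepth 100000


-- B replaces A's reduce-of-concatenations over per-byte mask tests by a precomputed 256-entry bit-pattern table consulted once per byte (return-value equivalence; neither mutates its argument).

-- ===== PORT A =====
-- nth_bit(byte, bit) = (byte & (1 << bit)) != 0   (Int.land is Python's two's-complement &)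
def pvNthBit (byte : Int) (bit : Int) : Bool :=
  decide (Int.land byte ((1 : Int) <<< bit) ≠ 0)

-- expand_byte(byte) = [nth_bit(byte, x) for x in range(8)]
def pvExpandByte (byte : Int) : List Bool :=
  (PySem.List.pyRange 0 8 1).map (fun x => pvNthBit byte x)

-- reduce(lambda x, y: x + y, map(expand_byte, data), [])
def extract_button_states (data : List Int) : List Bool :=
  (data.map pvExpandByte).foldl (fun x y => x ++ y) []

-- ===== PORT B =====
-- hand port of format(i, '08b') for 0 ≤ i < 256 (exact there): the 8 binary digits, most significant first
def pvBin8 (i : Nat) : List Char :=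
  (List.range 8).map (fun k => if i.testBit (7 - k) then '1' else '0')

-- _BYTE_BITS = [[c == '1' for c in format(i, '08b')[::-1]] for i in range(256)]
def pvByteTable : List (List Bool) :=
  (List.range 256).map (fun i => (pvBin8 i).reverse.map (fun c => c == '1'))

-- for byte in data: states.extend(_BYTE_BITS[byte & 0xFF])   (index is always in range, so getD's default is never used)
def extract_button_states_alt (data : List Int) : List Bool :=
  data.foldl (fun states byte => states ++ pvByteTable.getD (Int.land byte 255).toNat []) []

-- ===== PRECONDITION & SPEC =====
def Spec_extract_button_states (data : List Int) (out : List Bool) : Prop := out = extract_button_states_alt data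
instance (data : List Int) (out : List Bool) : Decidable (Spec_extract_button_states data out) := by unfold Spec_extract_button_states; infer_instance

-- ===== CLAIM =====
def Claim_equal_extract_button_states : Prop := ∀ (data : List Int), Dom_extract_button_states data → Spec_extract_button_states data (extract_button_states data)

-- ===== LEMMAS AND PROOFS =====

-- A's fold of concatenations is a flatMap
theorem foldA (data : List Int) (acc : List Bool) :
    (data.map pvExpandByte).foldl (fun x y => x ++ y) acc = acc ++ data.flatMap pvExpandByte := by
  induction data generalizing acc with
  | nil => simp
  | cons b t ih => simp [ih]

-- B's fold of table lookups is a flatMap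
theorem foldB (data : List Int) (acc : List Bool) :
    data.foldl (fun states byte => states ++ pvByteTable.getD (Int.land byte 255).toNat []) acc
      = acc ++ data.flatMap (fun byte => pvByteTable.getD (Int.land byte 255).toNat []) := by
  induction data generalizing acc with
  | nil => simp
  | cons b t ih => simp [List.flatMap_def]

-- bit test via land equals testBit
theorem land_two_pow_ne_zero (b : Int) (x : ℕ) :
    (Int.land b ((2 : ℤ) ^ x) ≠ 0) ↔ b.testBit x = true := by
  have hcast : ((2 : ℤ) ^ x) = Int.ofNat (2 ^ x) := by simp [Int.ofNat_eq_natCast]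
  constructor
  · intro h
    by_contra hb
    apply h
    rw [Bool.not_eq_true] at hb
    cases b with
    | ofNat m =>
      have hm : m.testBit x = false := by simpa [Int.testBit] using hb
      rw [hcast]
      show Int.ofNat (m &&& 2 ^ x) = 0
      rw [Nat.and_two_pow, hm]
      simp
    | negSucc m =>
      have hm : m.testBit x = true := by simpa [Int.testBit] using hb
      rw [hcast]
      show Int.ofNat (Nat.ldiff (2 ^ x) m) = 0
      have : Nat.ldiff (2 ^ x) m = 0 := by
        apply Nat.eq_of_testBit_eq
        intro k
        rw [Nat.testBit_ldiff, Nat.zero_testBit]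
        by_cases hk : k = x
        · subst hk; simp [hm, Nat.testBit_two_pow_self]
        · simp [Nat.testBit_two_pow_of_ne (Ne.symm hk)]
      simp [this]
  · intro h hz
    have := Int.testBit_land b ((2:ℤ) ^ x) x
    rw [hz] at this
    have h2 : ((2:ℤ) ^ x).testBit x = true := by
      rw [hcast]; show Nat.testBit (2 ^ x) x = true
      exact Nat.testBit_two_pow_self
    rw [h, h2] at this
    simpa [Int.testBit] using this.symm

-- complementing the low 8 bits of r < 256
theorem compl_bit : ∀ r : Fin 256, ∀ x : Fin 8, Nat.testBit (255 - r.val) x.val = !Nat.testBit r.val x.val := by decide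

-- bits below 8 only depend on the value mod 256
theorem testBit_emod_256 (b : Int) (x : ℕ) (hx : x < 8) :
    b.testBit x = (b.emod 256).toNat.testBit x := by
  cases b with
  | ofNat m =>
    have h : (Int.ofNat m).emod 256 = Int.ofNat (m % 256) := by
      show (↑m) % (256:ℤ) = ↑(m % 256)
      exact_mod_cast (Int.natCast_mod m 256).symm
    rw [h]
    show m.testBit x = (Int.ofNat (m % 256)).toNat.testBit x
    have : (Int.ofNat (m % 256)).toNat = m % 256 := rfl
    rw [this]
    have h256 : (256 : ℕ) = 2 ^ 8 := by norm_num
    rw [h256, Nat.testBit_mod_two_pow]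
    simp [hx]
  | negSucc m =>
    have hneg : (Int.negSucc m).emod 256 = Int.ofNat (255 - m % 256) := by
      have h0 : (Int.negSucc m) = -(↑m + 1) := Int.negSucc_eq m
      show (Int.negSucc m) % (256:ℤ) = ((255 - m % 256 : ℕ) : ℤ)
      rw [h0]
      have hle : m % 256 ≤ 255 := by
        have := Nat.mod_lt m (show 0 < 256 by norm_num); omega
      have h1 : ((255 - m % 256 : ℕ) : ℤ) = 255 - ((m : ℤ) % 256) := by
        push_cast [hle]; ring
      rw [h1]
      omega
    rw [hneg]
    show (!m.testBit x) = (Int.ofNat (255 - m % 256)).toNat.testBit x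
    have ht : (Int.ofNat (255 - m % 256)).toNat = 255 - m % 256 := rfl
    rw [ht]
    have hr : m % 256 < 256 := Nat.mod_lt _ (by norm_num)
    have := compl_bit ⟨m % 256, hr⟩ ⟨x, hx⟩
    simp only [] at this
    rw [this]
    congr 1
    have h256 : (256 : ℕ) = 2 ^ 8 := by norm_num
    rw [h256, Nat.testBit_mod_two_pow]
    simp [hx]

-- Python's b & 0xFF is b mod 256
theorem land255 (b : Int) : Int.land b 255 = b.emod 256 := by
  have h255n : ∀ k : ℕ, Nat.testBit 255 k = decide (k < 8) := by
    intro k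
    have : (255 : ℕ) = 2 ^ 8 - 1 := by norm_num
    rw [this, Nat.testBit_two_pow_sub_one]
  cases b with
  | ofNat m =>
    show Int.ofNat (m &&& 255) = (Int.ofNat m).emod 256
    have hm : m &&& 255 = m % 256 := by
      apply Nat.eq_of_testBit_eq
      intro k
      rw [Nat.testBit_and, h255n]
      have h256 : (256 : ℕ) = 2 ^ 8 := by norm_num
      rw [h256, Nat.testBit_mod_two_pow]
      by_cases hk : k < 8 <;> simp [hk]
    rw [hm]
    show ((m % 256 : ℕ) : ℤ) = (↑m) % (256:ℤ)
    exact_mod_cast Int.natCast_mod m 256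
  | negSucc m =>
    show Int.ofNat (Nat.ldiff 255 m) = (Int.negSucc m).emod 256
    have hneg : (Int.negSucc m).emod 256 = Int.ofNat (255 - m % 256) := by
      have h0 : (Int.negSucc m) = -(↑m + 1) := Int.negSucc_eq m
      show (Int.negSucc m) % (256:ℤ) = ((255 - m % 256 : ℕ) : ℤ)
      rw [h0]
      have hle : m % 256 ≤ 255 := by
        have := Nat.mod_lt m (show 0 < 256 by norm_num); omega
      have h1 : ((255 - m % 256 : ℕ) : ℤ) = 255 - ((m : ℤ) % 256) := by
        push_cast [hle]; ring
      rw [h1]; omega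
    rw [hneg]
    congr 1
    apply Nat.eq_of_testBit_eq
    intro k
    rw [Nat.testBit_ldiff, h255n]
    have hr : m % 256 < 256 := Nat.mod_lt _ (by norm_num)
    by_cases hk : k < 8
    · have hc := compl_bit ⟨m % 256, hr⟩ ⟨k, hk⟩
      simp only [] at hc
      rw [hc]
      have h256 : (256 : ℕ) = 2 ^ 8 := by norm_num
      rw [h256, Nat.testBit_mod_two_pow]
      simp [hk]
    · have hz : Nat.testBit (255 - m % 256) k = false := by
        apply Nat.testBit_lt_two_pow
        calc 255 - m % 256 < 256 := by omega
          _ = 2 ^ 8 := by norm_num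
          _ ≤ 2 ^ k := Nat.pow_le_pow_right (by norm_num) (by omega)
      simp [hk, hz]

-- the table entry for r < 256 lists r's bits, LSB first
theorem table_lookup : ∀ r : Fin 256,
    pvByteTable.getD r.val [] = (List.range 8).map (fun k => Nat.testBit r.val k) := by decide

-- per byte, A's expansion equals B's table lookup
theorem expand_eq (b : Int) :
    pvExpandByte b = pvByteTable.getD (Int.land b 255).toNat [] := by
  rw [land255]
  have hnn : (0:ℤ) ≤ b.emod 256 := Int.emod_nonneg b (by norm_num)
  have hlt : b.emod 256 < 256 := Int.emod_lt_of_pos b (by norm_num)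
  have hr : (b.emod 256).toNat < 256 := by omega
  rw [table_lookup ⟨(b.emod 256).toNat, hr⟩]
  have hrange : PySem.List.pyRange 0 8 1 = (List.range 8).map (fun k : ℕ => (k : ℤ)) := by decide
  rw [pvExpandByte, hrange, List.map_map]
  apply List.map_congr_left
  intro k hk
  have hk8 : k < 8 := List.mem_range.mp hk
  show pvNthBit b (k : ℤ) = (b.emod 256).toNat.testBit k
  unfold pvNthBit
  have hsh : ((1:ℤ) <<< (k : ℤ)) = 2 ^ k := by rw [Int.one_shiftLeft]; push_cast; ring
  rw [hsh, ← testBit_emod_256 b k hk8]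
  cases hb : b.testBit k
  · simp [land_two_pow_ne_zero, hb]
  · simp [land_two_pow_ne_zero, hb]

-- ===== VERDICT =====
theorem extract_button_states_spec : Claim_equal_extract_button_states := by
  intro data _
  unfold Spec_extract_button_states extract_button_states extract_button_states_alt
  rw [foldA, foldB]
  simp only [List.nil_append]
  exact List.flatMap_congr (fun b _ => expand_eq b)
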